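-- pv_equiv track=rewrite | github.com/jsdae90/BOJ-algorithm | Programmers Algorithm S6/week1/week1_queue_tutorial.py | solution
-- ===== SOURCE A (Python) =====
-- from collections import deque
--
-- def solution(n, exec_times):
--     queue = deque(exec_times)
--
--     # finished_at: 서버가 처리 중인 일이 끝나는 시각
--     # jobs_done: 서버가 처리한 코드 수
--     servers = [{"finished_at": 0, "jobs_done": 0} for _ in range(n)]
--     cur_time = 0
--
--     while queue:
--         for server in servers:
--             if not queue:
--                 break
--             if server["finished_at"] <= cur_time:
--                 server["finished_at"] += queue.popleft()
--                 server["jobs_done"] += 1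
--         cur_time += 1
--     return [server["jobs_done"] for server in servers]
-- ===== SOURCE B (Python) =====
-- def solution(n, exec_times):
--     # event-driven: instead of sweeping every server once per clock tick, hand
--     # each job directly to the server whose next start tick comes first (lowest
--     # index on ties).  A server starts at most one job per tick, so after
--     # starting a job its next start is when the job finishes or one tick later,
--     # whichever comes later.
--     next_start = [0] * n
--     finished_at = [0] * n
--     jobs_done = [0] * n
--     for d in exec_times:
--         i = next_start.index(min(next_start))
--         finished_at[i] += d
--         jobs_done[i] += 1
--         next_start[i] = max(finished_at[i], next_start[i] + 1)
--     return jobs_done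
-- ===== Notes on version B (the rewrite author's own statement) =====
-- stated objective: alternative
-- what changed: Replaces A's tick-by-tick time simulation (one sweep over all servers per simulated time unit) by a single event-driven pass over the jobs that hands each job to the server whose next start tick comes first (lowest index on ties), so the work no longer depends on the simulated clock; Pre_ excludes only n <= 0 with a nonempty job list, where A's while-loop never terminates (and B raises ValueError).
import Mathlib
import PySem

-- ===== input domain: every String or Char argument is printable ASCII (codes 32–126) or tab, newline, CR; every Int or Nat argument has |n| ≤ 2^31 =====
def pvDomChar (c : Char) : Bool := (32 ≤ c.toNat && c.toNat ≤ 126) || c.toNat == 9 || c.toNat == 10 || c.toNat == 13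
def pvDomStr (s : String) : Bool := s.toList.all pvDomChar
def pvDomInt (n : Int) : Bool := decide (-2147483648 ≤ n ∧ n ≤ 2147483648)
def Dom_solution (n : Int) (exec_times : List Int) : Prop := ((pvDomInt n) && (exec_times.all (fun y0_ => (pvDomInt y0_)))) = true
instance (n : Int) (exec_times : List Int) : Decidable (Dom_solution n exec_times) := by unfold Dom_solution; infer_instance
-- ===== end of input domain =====

-- B replaces A's tick-by-tick time simulation by a single event-driven pass over
-- the jobs, handing each job to the server whose next start tick comes first.

-- ===== PORT A =====
-- one pass of A's inner `for server in servers` loop at time t: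
-- returns the updated server list and the remaining queue
def pvRoundA (t : Int) : List (Int × Int) → List Int → List (Int × Int) × List Int
  | [], q => ([], q)
  | s :: rest, [] => (s :: rest, [])          -- `if not queue: break`
  | s :: rest, j :: q' =>
    if s.1 ≤ t then
      let r := pvRoundA t rest q'
      ((s.1 + j, s.2 + 1) :: r.1, r.2)
    else
      let r := pvRoundA t rest (j :: q')
      (s :: r.1, r.2)

-- A's `while queue:` loop; fuel bounds the number of rounds (sufficient under Pre_)
def pvLoopA : Nat → List (Int × Int) → List Int → Int → List (Int × Int)
  | 0, ss, _, _ => ss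
  | fuel + 1, ss, q, t =>
    match q with
    | [] => ss
    | _ :: _ =>
      let r := pvRoundA t ss q
      pvLoopA fuel r.1 r.2 (t + 1)

def solution (n : Int) (exec_times : List Int) : List Int :=
  (pvLoopA ((exec_times.map Int.natAbs).sum + exec_times.length + 1)
    (List.replicate n.toNat (0, 0)) exec_times 0).map Prod.snd

-- ===== PORT B =====
-- state (next_start, finished_at, jobs_done); one job:
-- assign to server next_start.index(min(next_start))
def pvStepB (st : List Int × List Int × List Int) (d : Int) : List Int × List Int × List Int :=
  match PySem.List.min? st.1 (fun x => x) with
  | none => st                    -- Python raises ValueError here (outside Pre_)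
  | some mn =>
    match PySem.List.index? st.1 mn with
    | none => st                  -- unreachable: mn ∈ next_start
    | some i =>
      let t := st.1.getD i 0
      let f := st.2.1.getD i 0 + d
      (st.1.set i (max f (t + 1)), st.2.1.set i f, st.2.2.set i (st.2.2.getD i 0 + 1))

def solution_alt (n : Int) (exec_times : List Int) : List Int :=
  (exec_times.foldl pvStepB
    (List.replicate n.toNat 0, List.replicate n.toNat 0, List.replicate n.toNat 0)).2.2

-- ===== PRECONDITION & SPEC =====
-- Pre_ excludes only the inputs on which A never returns: with a nonempty job
-- list and n ≤ 0 A's `while queue` loop spins forever (and B raises ValueError).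
def Pre_solution (n : Int) (exec_times : List Int) : Prop := exec_times = [] ∨ 1 ≤ n
instance (n : Int) (exec_times : List Int) : Decidable (Pre_solution n exec_times) := by unfold Pre_solution; infer_instance

def pvWitness_solution : Int × List Int := (2, [3, 1, 2, 1])

def Spec_solution (n : Int) (exec_times : List Int) (out : List Int) : Prop := out = solution_alt n exec_times
instance (n : Int) (exec_times : List Int) (out : List Int) : Decidable (Spec_solution n exec_times out) := by unfold Spec_solution; infer_instance

-- ===== CLAIM (what is proved, stated in full; the proofs are below) =====
def Claim_equal_solution : Prop := ∀ (n : Int) (exec_times : List Int), Dom_solution n exec_times → Pre_solution n exec_times → Spec_solution n exec_times (solution n exec_times)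

-- ===== LEMMAS AND PROOFS =====

def absSumI (q : List Int) : Int := ((q.map Int.natAbs).sum : Nat)

lemma absSumI_nonneg (q : List Int) : 0 ≤ absSumI q := by
  simp only [absSumI]; positivity

lemma absSumI_cons (j : Int) (q : List Int) : absSumI (j :: q) = (j.natAbs : Int) + absSumI q := by
  simp [absSumI]

lemma forall₂_left_mem {R : Int → Int → Prop} {Q : Int → Prop} (h : ∀ a b, R a b → Q a) :
    ∀ {l1 l2 : List Int}, List.Forall₂ R l1 l2 → ∀ x ∈ l1, Q x := by
  intro l1 l2 hf
  induction hf with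
  | nil => intro x hx; cases hx
  | cons hr _ ih =>
    intro x hx
    rcases List.mem_cons.mp hx with h1 | h1
    · exact h1 ▸ h _ _ hr
    · exact ih x h1

lemma pvRoundA_length (t : Int) : ∀ (ss : List (Int × Int)) (q : List Int),
    (pvRoundA t ss q).1.length = ss.length := by
  intro ss
  induction ss with
  | nil => intro q; simp [pvRoundA]
  | cons s rest ih =>
    intro q
    cases q with
    | nil => simp [pvRoundA]
    | cons j q' =>
      by_cases h : s.1 ≤ t <;> simp [pvRoundA, h, ih]

lemma pvRoundA_queue_le (t : Int) : ∀ (ss : List (Int × Int)) (q : List Int),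
    (pvRoundA t ss q).2.length ≤ q.length ∧ absSumI (pvRoundA t ss q).2 ≤ absSumI q := by
  intro ss
  induction ss with
  | nil => intro q; simp [pvRoundA]
  | cons s rest ih =>
    intro q
    cases q with
    | nil => simp [pvRoundA]
    | cons j q' =>
      have hj : (0 : Int) ≤ (j.natAbs : Int) := Int.natCast_nonneg _
      by_cases h : s.1 ≤ t
      · have h1 := (ih q').1
        have h2 := (ih q').2
        have h3 := absSumI_cons j q'
        simp only [pvRoundA, if_pos h]
        constructor
        · simp; omega
        · omega
      · have h1 := (ih (j :: q')).1
        have h2 := (ih (j :: q')).2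
        simp only [pvRoundA, if_neg h]
        exact ⟨h1, h2⟩

lemma pvRoundA_nopop (t : Int) : ∀ (ss : List (Int × Int)) (q : List Int),
    (∀ s ∈ ss, ¬ s.1 ≤ t) → pvRoundA t ss q = (ss, q) := by
  intro ss
  induction ss with
  | nil => intro q _; simp [pvRoundA]
  | cons s rest ih =>
    intro q hb
    cases q with
    | nil => simp [pvRoundA]
    | cons j q' =>
      have hs : ¬ s.1 ≤ t := hb s (by simp)
      have hr := ih (j :: q') (fun x hx => hb x (List.mem_cons_of_mem _ hx))
      simp [pvRoundA, hs, hr]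

lemma pvRoundA_pop (t : Int) : ∀ (ss : List (Int × Int)) (q : List Int),
    q ≠ [] → (∃ s ∈ ss, s.1 ≤ t) → (pvRoundA t ss q).2.length < q.length := by
  intro ss
  induction ss with
  | nil => intro q _ hex; simp at hex
  | cons s rest ih =>
    intro q hq hex
    cases q with
    | nil => exact absurd rfl hq
    | cons j q' =>
      by_cases h : s.1 ≤ t
      · have h1 := (pvRoundA_queue_le t rest q').1
        simp only [pvRoundA, if_pos h]
        simp
        omega
      · obtain ⟨w, hw, hwle⟩ := hex
        rcases List.mem_cons.mp hw with h1 | h1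
        · exact absurd (h1 ▸ hwle) h
        · have := ih (j :: q') (by simp) ⟨w, h1, hwle⟩
          simpa [pvRoundA, h] using this

lemma pvRoundA_bound (t K : Int) : ∀ (ss : List (Int × Int)) (q : List Int),
    (∀ s ∈ ss, (s.1.natAbs : Int) + absSumI q ≤ K) →
    ∀ s ∈ (pvRoundA t ss q).1, (s.1.natAbs : Int) + absSumI (pvRoundA t ss q).2 ≤ K := by
  intro ss
  induction ss with
  | nil => intro q _ s hs; simp [pvRoundA] at hs
  | cons s rest ih =>
    intro q hb x hx
    cases q with
    | nil =>
      simp only [pvRoundA] at hx ⊢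
      have := hb x hx
      simp [absSumI] at *
      have h0 := absSumI_nonneg ([] : List Int)
      omega
    | cons j q' =>
      have hj : (0 : Int) ≤ (j.natAbs : Int) := Int.natCast_nonneg _
      have hcons := absSumI_cons j q'
      by_cases h : s.1 ≤ t
      · have hle := (pvRoundA_queue_le t rest q').2
        simp only [pvRoundA, if_pos h] at hx ⊢
        rcases List.mem_cons.mp hx with h1 | h1
        · subst h1
          have hhd := hb s (by simp)
          have habs : ((s.1 + j).natAbs : Int) ≤ (s.1.natAbs : Int) + (j.natAbs : Int) := by
            have := Int.natAbs_add_le s.1 j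
            exact_mod_cast this
          simp only
          omega
        · exact ih q' (fun y hy => by have := hb y (List.mem_cons_of_mem _ hy); omega) x h1
      · simp only [pvRoundA, if_neg h] at hx ⊢
        rcases List.mem_cons.mp hx with h1 | h1
        · subst h1
          have hhd := hb x (by simp)
          have hle := (pvRoundA_queue_le t rest (j :: q')).2
          omega
        · exact ih (j :: q') (fun y hy => hb y (List.mem_cons_of_mem _ hy)) x h1

lemma getD_append_len (xs : List Int) (y : Int) (ys : List Int) (d : Int) :
    (xs ++ y :: ys).getD xs.length d = y := by
  simp

lemma set_append_len (xs : List Int) (y : Int) (ys : List Int) (v : Int) :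
    (xs ++ y :: ys).set xs.length v = xs ++ v :: ys := by
  induction xs with
  | nil => rfl
  | cons x xs ih => simp [ih]

lemma forall₂_snoc {R : Int → Int → Prop} {x y : Int} :
    ∀ {l1 l2 : List Int}, List.Forall₂ R l1 l2 → R x y →
    List.Forall₂ R (l1 ++ [x]) (l2 ++ [y]) := by
  intro l1 l2 h hx
  induction h with
  | nil => exact List.Forall₂.cons hx List.Forall₂.nil
  | cons hr _ ih => exact List.Forall₂.cons hr ih

-- the argmin step of B lands exactly on the head of the suffix when that head
-- carries the minimal next_start value t and everything in the prefix is > t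
lemma pvStepB_at (t : Int) (avP avR finsP finsR cntsP cntsR : List Int) (fh ch j : Int)
    (hlenF : finsP.length = avP.length) (hlenC : cntsP.length = avP.length)
    (hP : ∀ x ∈ avP, t + 1 ≤ x) (hR : ∀ x ∈ avR, t ≤ x) :
    pvStepB (avP ++ t :: avR, finsP ++ fh :: finsR, cntsP ++ ch :: cntsR) j
      = (avP ++ (max (fh + j) (t + 1)) :: avR, finsP ++ (fh + j) :: finsR, cntsP ++ (ch + 1) :: cntsR) := by
  have hne : (avP ++ t :: avR) ≠ [] := by simp
  obtain ⟨m, hm⟩ : ∃ m, PySem.List.min? (avP ++ t :: avR) (fun x => x) = some m := by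
    cases hmin : PySem.List.min? (avP ++ t :: avR) (fun x => x) with
    | none => exact absurd ((PySem.List.min?_eq_none_iff _ _).mp hmin) hne
    | some m => exact ⟨m, rfl⟩
  have hmmem := PySem.List.min?_mem hm
  have hmin1 : m ≤ t := PySem.List.min?_isMin hm t (by simp)
  have hmin2 : t ≤ m := by
    rcases List.mem_append.mp hmmem with h1 | h1
    · have := hP m h1; omega
    · rcases List.mem_cons.mp h1 with h2 | h2
      · omega
      · exact hR m h2
  have hmt : m = t := le_antisymm hmin1 hmin2
  subst hmt
  have hidx : PySem.List.index? (avP ++ m :: avR) m = some avP.length :=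
    (PySem.List.index?_eq_some_iff _ _ _).mpr
      ⟨avP, avR, rfl, rfl, fun hmem => by have := hP m hmem; omega⟩
  have e1 : (avP ++ m :: avR).getD avP.length 0 = m := getD_append_len _ _ _ _
  have e2 : (finsP ++ fh :: finsR).getD avP.length 0 = fh := by
    rw [← hlenF]; exact getD_append_len _ _ _ _
  have e3 : (cntsP ++ ch :: cntsR).getD avP.length 0 = ch := by
    rw [← hlenC]; exact getD_append_len _ _ _ _
  have e4 : ∀ v, (avP ++ m :: avR).set avP.length v = avP ++ v :: avR :=
    fun v => set_append_len _ _ _ _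
  have e5 : ∀ v, (finsP ++ fh :: finsR).set avP.length v = finsP ++ v :: finsR := by
    intro v; rw [← hlenF]; exact set_append_len _ _ _ _
  have e6 : ∀ v, (cntsP ++ ch :: cntsR).set avP.length v = cntsP ++ v :: cntsR := by
    intro v; rw [← hlenC]; exact set_append_len _ _ _ _
  simp only [pvStepB, hm, hidx, e1, e2, e3, e4, e5, e6]

-- core round lemma: B's fold consumes exactly the jobs A's round at time t hands out
lemma pvRound (t : Int) : ∀ (ssR : List (Int × Int)) (q avP finsP cntsP avR : List Int),
    List.Forall₂ (fun a f => t + 1 ≤ a ∧ f ≤ a ∧ (a ≤ t + 1 ∨ a = f)) avP finsP →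
    List.Forall₂ (fun a f => t ≤ a ∧ f ≤ a ∧ (a ≤ t ∨ a = f)) avR (ssR.map Prod.fst) →
    cntsP.length = avP.length →
    ∃ avR',
      q.foldl pvStepB (avP ++ avR, finsP ++ ssR.map Prod.fst, cntsP ++ ssR.map Prod.snd)
        = (pvRoundA t ssR q).2.foldl pvStepB
            (avP ++ avR', finsP ++ (pvRoundA t ssR q).1.map Prod.fst, cntsP ++ (pvRoundA t ssR q).1.map Prod.snd)
      ∧ List.Forall₂ (fun a f => t ≤ a ∧ f ≤ a ∧ (a ≤ t + 1 ∨ a = f) ∧ ((pvRoundA t ssR q).2 ≠ [] → t + 1 ≤ a)) avR' ((pvRoundA t ssR q).1.map Prod.fst) := by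
  intro ssR
  induction ssR with
  | nil =>
    intro q avP finsP cntsP avR hP hR hlen
    have havR : avR = [] := by cases hR; rfl
    subst havR
    exact ⟨[], by simp [pvRoundA], by simp [pvRoundA]⟩
  | cons s rest ih =>
    intro q avP finsP cntsP avR hP hR hlen
    simp only [List.map_cons] at hR
    obtain ⟨a, avR0, ha, hR0, rfl⟩ := List.forall₂_cons_right_iff.mp hR
    obtain ⟨h1a, h2a, h3a⟩ := ha
    cases q with
    | nil =>
      refine ⟨a :: avR0, by simp [pvRoundA], ?_⟩
      simp only [pvRoundA, List.map_cons]
      refine List.Forall₂.cons ⟨h1a, h2a, by omega, fun hc => absurd rfl hc⟩ ?_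
      exact hR0.imp fun x y ⟨k1, k2, k3⟩ => ⟨k1, k2, by omega, fun hc => absurd rfl hc⟩
    | cons j qr =>
      by_cases hfree : s.1 ≤ t
      · have hat : t = a := by omega
        subst hat
        have hlenF : finsP.length = avP.length := hP.length_eq.symm
        have hPl : ∀ x ∈ avP, t + 1 ≤ x := forall₂_left_mem (fun x y h => h.1) hP
        have hRl : ∀ x ∈ avR0, t ≤ x := forall₂_left_mem (fun x y h => h.1) hR0
        have hstep := pvStepB_at t avP avR0 finsP (rest.map Prod.fst) cntsP (rest.map Prod.snd)
          s.1 s.2 j hlenF hlen hPl hRl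
        have hP' : List.Forall₂ (fun a f => t + 1 ≤ a ∧ f ≤ a ∧ (a ≤ t + 1 ∨ a = f))
            (avP ++ [max (s.1 + j) (t + 1)]) (finsP ++ [s.1 + j]) := by
          refine forall₂_snoc hP ⟨le_max_right _ _, le_max_left _ _, ?_⟩
          rcases max_choice (s.1 + j) (t + 1) with h | h
          · exact Or.inr h
          · exact Or.inl (le_of_eq h)
        obtain ⟨avR'', hfold2, hF2⟩ := ih qr (avP ++ [max (s.1 + j) (t + 1)])
          (finsP ++ [s.1 + j]) (cntsP ++ [s.2 + 1]) avR0 hP' hR0 (by simp [hlen])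
        have hrA : pvRoundA t (s :: rest) (j :: qr)
            = ((s.1 + j, s.2 + 1) :: (pvRoundA t rest qr).1, (pvRoundA t rest qr).2) := by
          simp [pvRoundA, hfree]
        refine ⟨max (s.1 + j) (t + 1) :: avR'', ?_, ?_⟩
        · rw [hrA]
          simp only [List.map_cons]
          rw [List.foldl_cons, hstep]
          simp only [List.append_cons _ (max (s.1 + j) (t + 1)) avR0,
            List.append_cons _ (s.1 + j) (rest.map Prod.fst),
            List.append_cons _ (s.2 + 1) (rest.map Prod.snd)] at hfold2 ⊢
          simpa using hfold2
        · rw [hrA]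
          simp only [List.map_cons]
          refine List.Forall₂.cons
            ⟨by omega, le_max_left _ _, ?_, fun _ => le_max_right _ _⟩ ?_
          · rcases max_choice (s.1 + j) (t + 1) with h | h
            · exact Or.inr h
            · exact Or.inl (le_of_eq h)
          · exact hF2
      · have hat : a = s.1 := by omega
        rw [hat]
        clear h3a h1a h2a hat
        have hP' : List.Forall₂ (fun a f => t + 1 ≤ a ∧ f ≤ a ∧ (a ≤ t + 1 ∨ a = f))
            (avP ++ [s.1]) (finsP ++ [s.1]) :=
          forall₂_snoc hP ⟨by omega, le_refl _, Or.inr rfl⟩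
        obtain ⟨avR'', hfold2, hF2⟩ := ih (j :: qr) (avP ++ [s.1])
          (finsP ++ [s.1]) (cntsP ++ [s.2]) avR0 hP' hR0 (by simp [hlen])
        have hrA : pvRoundA t (s :: rest) (j :: qr)
            = (s :: (pvRoundA t rest (j :: qr)).1, (pvRoundA t rest (j :: qr)).2) := by
          simp [pvRoundA, hfree]
        refine ⟨s.1 :: avR'', ?_, ?_⟩
        · rw [hrA]
          simp only [List.map_cons]
          simp only [List.append_cons _ (s.1 : Int) avR0,
            List.append_cons _ (s.1 : Int) (rest.map Prod.fst),
            List.append_cons _ (s.2 : Int) (rest.map Prod.snd)] at hfold2 ⊢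
          simpa using hfold2
        · rw [hrA]
          simp only [List.map_cons]
          exact List.Forall₂.cons ⟨by omega, le_refl _, Or.inr rfl, fun _ => by omega⟩ hF2

lemma pvMain (K : Int) : ∀ (fuel : Nat) (ss : List (Int × Int)) (q : List Int) (t : Int) (av : List Int),
    (q ≠ [] → ss ≠ []) →
    0 ≤ t →
    List.Forall₂ (fun a f => t ≤ a ∧ f ≤ a ∧ (a ≤ t ∨ a = f)) av (ss.map Prod.fst) →
    (∀ s ∈ ss, (s.1.natAbs : Int) + absSumI q ≤ K) →
    q.length + (K - t).toNat ≤ fuel →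
    (pvLoopA fuel ss q t).map Prod.snd = (q.foldl pvStepB (av, ss.map Prod.fst, ss.map Prod.snd)).2.2 := by
  intro fuel
  induction fuel with
  | zero =>
    intro ss q t av _ _ _ _ h5
    have hq : q = [] := by
      cases q with
      | nil => rfl
      | cons a b => simp [List.length_cons] at h5
    subst hq
    simp [pvLoopA]
  | succ f ih =>
    intro ss q t av h1 h2 h3 h4 h5
    cases q with
    | nil => simp [pvLoopA]
    | cons j qr =>
      have hss : ss ≠ [] := h1 (by simp)
      obtain ⟨avR', hfold, hF⟩ := pvRound t ss (j :: qr) [] [] [] av List.Forall₂.nil h3 rfl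
      simp only [List.nil_append] at hfold hF
      have hloop : pvLoopA (f + 1) ss (j :: qr) t
          = pvLoopA f (pvRoundA t ss (j :: qr)).1 (pvRoundA t ss (j :: qr)).2 (t + 1) := rfl
      rw [hloop, hfold]
      have hlen' := pvRoundA_length t ss (j :: qr)
      have hb' := pvRoundA_bound t K ss (j :: qr) h4
      cases hq' : (pvRoundA t ss (j :: qr)).2 with
      | nil =>
        rw [hq'] at hF
        have hstop : pvLoopA f (pvRoundA t ss (j :: qr)).1 [] (t + 1)
            = (pvRoundA t ss (j :: qr)).1 := by cases f <;> rfl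
        rw [hstop]
        simp
      | cons j2 q2 =>
        rw [hq'] at hF hb'
        apply ih
        · intro _
          exact List.ne_nil_of_length_pos (by
            rw [hlen']; exact List.length_pos_of_ne_nil hss)
        · omega
        · exact hF.imp fun a f ⟨x1, x2, x3, x4⟩ => ⟨x4 (by simp), x2, x3⟩
        · exact hb'
        · by_cases hfree : ∃ s ∈ ss, s.1 ≤ t
          · have hpop := pvRoundA_pop t ss (j :: qr) (by simp) hfree
            rw [hq'] at hpop
            have l1 : (j :: qr).length = qr.length + 1 := rfl
            have l2 : (j2 :: q2).length = q2.length + 1 := rfl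
            omega
          · have hfree' : ∀ x ∈ ss, ¬ x.1 ≤ t := fun x hx hle => hfree ⟨x, hx, hle⟩
            have hnp := pvRoundA_nopop t ss (j :: qr) hfree'
            rw [hnp] at hq'
            cases ss with
            | nil => exact absurd rfl hss
            | cons s0 sr =>
              have hbusy : t < s0.1 := not_le.mp (hfree' s0 (by simp))
              have hK := h4 s0 (by simp)
              have hna : s0.1 ≤ (s0.1.natAbs : Int) := Int.le_natAbs
              have habs := absSumI_nonneg (j :: qr)
              have hqeq : (j :: qr : List Int) = j2 :: q2 := hq'
              have l0 : (j :: qr).length = (j2 :: q2).length := by rw [hqeq]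
              have l1 : (j :: qr).length = qr.length + 1 := rfl
              have l2 : (j2 :: q2).length = q2.length + 1 := rfl
              omega

lemma forall₂_replicate (m : Nat) {P : Int → Int → Prop} (h : P 0 0) :
    List.Forall₂ P (List.replicate m 0) (List.replicate m 0) := by
  induction m with
  | zero => simp
  | succ k ih =>
    exact List.Forall₂.cons h ih

-- ===== VERDICT (by name: the statement is the Claim_ definition above) =====
theorem solution_spec : Claim_equal_solution := by
  intro n ex hdom hpre
  unfold Spec_solution solution solution_alt
  have hmapf : (List.replicate n.toNat ((0 : Int), (0 : Int))).map Prod.fst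
      = List.replicate n.toNat (0 : Int) := by simp
  have hmaps : (List.replicate n.toNat ((0 : Int), (0 : Int))).map Prod.snd
      = List.replicate n.toNat (0 : Int) := by simp
  have hmain := pvMain (absSumI ex) ((ex.map Int.natAbs).sum + ex.length + 1)
    (List.replicate n.toNat ((0 : Int), (0 : Int))) ex 0 (List.replicate n.toNat (0 : Int))
    ?_ le_rfl ?_ ?_ ?_
  · rw [hmapf, hmaps] at hmain
    exact hmain
  · intro hq
    rcases hpre with h | h
    · exact absurd h hq
    · have : 1 ≤ n.toNat := by omega
      simp only [ne_eq, List.replicate_eq_nil_iff]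
      omega
  · rw [hmapf]
    exact forall₂_replicate n.toNat ⟨le_rfl, le_rfl, Or.inl le_rfl⟩
  · intro s hs
    have hs0 : s = ((0 : Int), (0 : Int)) := List.eq_of_mem_replicate hs
    subst hs0
    simp
  · simp only [absSumI, Int.sub_zero, Int.toNat_natCast]
    omega
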